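-- pv_equiv track=rewrite | github.com/Raychani1/FEI_STU_Bachelor | Year 1./1. Term ( Winter )/Programming_1_(B-PROG1)/Project/Ludo_(Refactored_2020)/Board/boardFunctions.py | create_fourth_row
-- ===== SOURCE A (Python) =====
-- def create_fourth_row(n):
--     fourth_row = []  # *DDDDDXDDDDD*
--
--     fourth_row.append("*")  # riadok kolmých Domčekov , X znamená stred šachovnice
--
--     for _ in range((n - 2) // 2):
--         fourth_row.append("D")
--
--     fourth_row.append("X")
--
--     for _ in range((n - 2) // 2):
--         fourth_row.append("D")
--
--     fourth_row.append("*")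
--
--     return fourth_row
-- ===== SOURCE B (Python) =====
-- def create_fourth_row(n):
--     k = max((n - 2) // 2, 0)
--     length = 2 * k + 3
--     center = k + 1
--     return ["*" if i == 0 or i == length - 1 else "X" if i == center else "D"
--             for i in range(length)]
-- ===== Notes on version B (the rewrite author's own statement) =====
-- stated objective: alternative
-- what changed: Replaced the four sequential appends/loops with a single positional pass: one comprehension over range(2*k+3) that decides each cell (border '*', center 'X', else 'D') from its index.
import Mathlib
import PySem

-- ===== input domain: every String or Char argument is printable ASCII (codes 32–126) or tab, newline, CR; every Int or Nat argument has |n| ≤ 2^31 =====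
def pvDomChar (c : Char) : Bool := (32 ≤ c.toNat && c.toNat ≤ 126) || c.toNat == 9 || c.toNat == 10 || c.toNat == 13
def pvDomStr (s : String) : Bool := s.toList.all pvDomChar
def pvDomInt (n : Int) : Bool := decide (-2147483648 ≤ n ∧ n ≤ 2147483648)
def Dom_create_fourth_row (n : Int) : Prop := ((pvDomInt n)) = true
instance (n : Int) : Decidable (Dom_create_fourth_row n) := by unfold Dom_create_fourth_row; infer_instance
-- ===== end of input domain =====

-- B replaces A's four sequential append phases by one positional pass deciding each
-- cell from its index (objective: alternative decomposition, same cost).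

-- ===== PORT A =====
def create_fourth_row (n : Int) : List String :=
  let fr : List String := []
  let fr := fr ++ ["*"]
  let fr := (PySem.List.pyRange 0 (PySem.Int.floordiv (n - 2) 2) 1).foldl
    (fun acc _ => acc ++ ["D"]) fr
  let fr := fr ++ ["X"]
  let fr := (PySem.List.pyRange 0 (PySem.Int.floordiv (n - 2) 2) 1).foldl
    (fun acc _ => acc ++ ["D"]) fr
  fr ++ ["*"]

-- ===== PORT B =====
def create_fourth_row_alt (n : Int) : List String :=
  let k := max (PySem.Int.floordiv (n - 2) 2) 0
  let length := 2 * k + 3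
  let center := k + 1
  (PySem.List.pyRange 0 length 1).map
    (fun i => if i = 0 ∨ i = length - 1 then "*" else if i = center then "X" else "D")

-- ===== PRECONDITION & SPEC =====
def Spec_create_fourth_row (n : Int) (out : List String) : Prop := out = create_fourth_row_alt n
instance (n : Int) (out : List String) : Decidable (Spec_create_fourth_row n out) := by unfold Spec_create_fourth_row; infer_instance

-- ===== CLAIM (what is proved, stated in full; the proofs are below) =====
def Claim_equal_create_fourth_row : Prop := ∀ (n : Int), Dom_create_fourth_row n → Spec_create_fourth_row n (create_fourth_row n)

-- ===== LEMMAS AND PROOFS =====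

-- appending a constant once per element of any list
theorem foldl_append_const {α : Type} (l : List α) (init : List String) :
    l.foldl (fun acc _ => acc ++ ["D"]) init = init ++ List.replicate l.length "D" := by
  induction l generalizing init with
  | nil => simp
  | cons x xs ih => simp [List.foldl, ih, List.replicate_succ]

-- map of a function constant on a list
theorem map_const_on {α : Type} (l : List α) (f : α → String)
    (h : ∀ x ∈ l, f x = "D") : l.map f = List.replicate l.length "D" := by
  rw [List.map_congr_left h]
  simp

-- A's result in normal form
theorem a_normal (n : Int) :
    create_fourth_row n =
      "*" :: List.replicate (PySem.Int.floordiv (n - 2) 2).toNat "D" ++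
        "X" :: List.replicate (PySem.Int.floordiv (n - 2) 2).toNat "D" ++ ["*"] := by
  unfold create_fourth_row
  dsimp only
  rw [foldl_append_const, foldl_append_const]
  simp [PySem.List.length_pyRange_one]

-- B's result in normal form
theorem b_normal (n : Int) :
    create_fourth_row_alt n =
      "*" :: List.replicate (PySem.Int.floordiv (n - 2) 2).toNat "D" ++
        "X" :: List.replicate (PySem.Int.floordiv (n - 2) 2).toNat "D" ++ ["*"] := by
  unfold create_fourth_row_alt
  dsimp only
  set k := max (PySem.Int.floordiv (n - 2) 2) 0 with hk
  have hk0 : 0 ≤ k := le_max_right _ _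
  have htoNat : k.toNat = (PySem.Int.floordiv (n - 2) 2).toNat := by
    rw [hk]; omega
  rw [← htoNat]
  have hsplit : PySem.List.pyRange 0 (2 * k + 3) 1 =
      [0] ++ PySem.List.pyRange 1 (k + 1) 1 ++ [k + 1] ++
        PySem.List.pyRange (k + 2) (2 * k + 2) 1 ++ [2 * k + 2] := by
    rw [PySem.List.pyRange_one_append 0 1 (2 * k + 3) (by omega) (by omega),
        PySem.List.pyRange_one_append 1 (k + 1) (2 * k + 3) (by omega) (by omega),
        PySem.List.pyRange_one_append (k + 1) (k + 2) (2 * k + 3) (by omega) (by omega),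
        PySem.List.pyRange_one_append (k + 2) (2 * k + 2) (2 * k + 3) (by omega) (by omega)]
    have h0 : PySem.List.pyRange 0 1 1 = [0] := PySem.List.pyRange_one_singleton 0
    have h1 : PySem.List.pyRange (k + 1) (k + 2) 1 = [k + 1] := by
      rw [show (k + 2 : Int) = (k + 1) + 1 by ring]
      exact PySem.List.pyRange_one_singleton _
    have h2 : PySem.List.pyRange (2 * k + 2) (2 * k + 3) 1 = [2 * k + 2] := by
      rw [show (2 * k + 3 : Int) = (2 * k + 2) + 1 by ring]
      exact PySem.List.pyRange_one_singleton _
    simp [h0, h1, h2]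
  rw [hsplit]
  simp only [List.map_append, List.map_cons, List.map_nil]
  have hmid1 : (PySem.List.pyRange 1 (k + 1) 1).map
      (fun i => if i = 0 ∨ i = 2 * k + 3 - 1 then "*" else if i = k + 1 then "X" else "D") =
      List.replicate (PySem.List.pyRange 1 (k + 1) 1).length "D" := by
    apply map_const_on
    intro x hx
    rw [PySem.List.mem_pyRange_one] at hx
    have h1 : ¬(x = 0 ∨ x = 2 * k + 3 - 1) := by omega
    have h2 : ¬(x = k + 1) := by omega
    simp [h1, h2]
  have hmid2 : (PySem.List.pyRange (k + 2) (2 * k + 2) 1).map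
      (fun i => if i = 0 ∨ i = 2 * k + 3 - 1 then "*" else if i = k + 1 then "X" else "D") =
      List.replicate (PySem.List.pyRange (k + 2) (2 * k + 2) 1).length "D" := by
    apply map_const_on
    intro x hx
    rw [PySem.List.mem_pyRange_one] at hx
    have h1 : ¬(x = 0 ∨ x = 2 * k + 3 - 1) := by omega
    have h2 : ¬(x = k + 1) := by omega
    simp [h1, h2]
  rw [hmid1, hmid2]
  have hl1 : (PySem.List.pyRange 1 (k + 1) 1).length = k.toNat := by
    rw [PySem.List.length_pyRange_one]; omega
  have hl2 : (PySem.List.pyRange (k + 2) (2 * k + 2) 1).length = k.toNat := by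
    rw [PySem.List.length_pyRange_one]; omega
  rw [hl1, hl2]
  have hc1 : ¬((k + 1 : Int) = 0 ∨ (k + 1 : Int) = 2 * k + 3 - 1) := by omega
  have he : ((2 * k + 2 : Int) = 0 ∨ (2 * k + 2 : Int) = 2 * k + 3 - 1) := by omega
  simp [hc1, he]

-- ===== VERDICT (by name: the statement is the Claim_ definition above) =====
theorem create_fourth_row_spec : Claim_equal_create_fourth_row := by
  intro n _
  unfold Spec_create_fourth_row
  rw [a_normal, b_normal]
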